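-- pv_equiv track=rewrite | github.com/MrBrantCode/unitest_baseline | mut_generate/mist_train_taco/taco_8018/solution.py | count_unrooted_labelled_trees
-- ===== SOURCE A (Python) =====
-- def count_unrooted_labelled_trees(n, l, P=10**9 + 7):
--     if n == 2:
--         return 1 if l == 0 else 0
--
--     def C(n, k):
--         return fact[n] * inv_fact[k] % P * inv_fact[n - k] % P
--
--     fact = [1]
--     for i in range(1, n + 1):
--         fact.append(fact[-1] * i % P)
--
--     inv = [0, 1]
--     for i in range(2, n + 1):
--         inv.append(P - P // i * inv[P % i] % P)
--
--     inv_fact = [1]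
--     for i in range(1, n + 1):
--         inv_fact.append(inv_fact[-1] * inv[i] % P)
--
--     k = n - l
--     ret = 0
--     for used in range(1, k + 1):
--         delta = C(k, used) * pow(used, n - 2, P) % P
--         if used & 1 == k & 1:
--             ret += delta
--         else:
--             ret -= delta
--
--     return ret % P * C(n, k) % P
-- ===== SOURCE B (Python) =====
-- def count_unrooted_labelled_trees(n, l, P=10**9 + 7):
--     if n == 2:
--         return 1 if l == 0 else 0
--
--     def C(n, k):
--         return fact[n] * inv_fact[k] % P * inv_fact[n - k] % P
--
--     fact = [1]
--     for i in range(1, n + 1):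
--         fact.append(fact[-1] * i % P)
--
--     inv = [0, 1]
--     for i in range(2, n + 1):
--         inv.append(P - P // i * inv[P % i] % P)
--
--     inv_fact = [1]
--     for i in range(1, n + 1):
--         inv_fact.append(inv_fact[-1] * inv[i] % P)
--
--     k = n - l
--     e = n - 2
--     # smallest-factor sieve: a modular exponentiation is needed only at primes;
--     # composite powers follow from the multiplicative law u**e = a**e * (u//a)**e
--     spf = list(range(k + 1))
--     p = 2
--     while p * p <= k:
--         if spf[p] == p:
--             for m in range(p * p, k + 1, p):
--                 if spf[m] == m:
--                     spf[m] = p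
--         p += 1
--     pw = [0] * (k + 1)
--     if k >= 1:
--         pw[1] = 1 % P
--     for u in range(2, k + 1):
--         if spf[u] == u:
--             pw[u] = pow(u, e, P)
--         else:
--             pw[u] = pw[spf[u]] * pw[u // spf[u]] % P
--
--     # alternating sum taken back-to-front with an explicit sign flag,
--     # reduced mod P at every step
--     ret = 0
--     sign = 1
--     for u in range(k, 0, -1):
--         ret = (ret + sign * (C(k, u) * pw[u] % P)) % P
--         sign = -sign
--     return ret * C(n, k) % P
-- ===== Notes on version B (the rewrite author's own statement) =====
-- stated objective: alternative
-- what changed: B keeps the factorial/inverse-factorial precomputation but replaces the per-term modular exponentiation of the inclusion-exclusion loop by a smallest-factor sieve that builds all powers u^(n-2) mod P multiplicatively (a modexp only at primes), and accumulates the alternating sum back-to-front with an explicit sign flag, reducing mod P at every step.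
import Mathlib
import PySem

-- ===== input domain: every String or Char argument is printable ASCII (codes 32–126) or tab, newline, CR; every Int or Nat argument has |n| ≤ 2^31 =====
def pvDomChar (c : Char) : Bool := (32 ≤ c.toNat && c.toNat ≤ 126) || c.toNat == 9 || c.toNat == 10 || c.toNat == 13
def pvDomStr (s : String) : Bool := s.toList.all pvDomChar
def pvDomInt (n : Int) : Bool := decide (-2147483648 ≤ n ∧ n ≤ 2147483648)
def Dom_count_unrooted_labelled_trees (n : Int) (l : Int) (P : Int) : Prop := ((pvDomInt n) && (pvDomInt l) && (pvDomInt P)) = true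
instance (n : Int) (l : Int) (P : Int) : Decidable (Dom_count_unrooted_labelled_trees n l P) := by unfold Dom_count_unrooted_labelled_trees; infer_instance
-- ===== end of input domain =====

-- B keeps A's factorial/inverse precomputation but builds the powers u^(n-2) mod P by a
-- smallest-factor sieve (modexp only at primes) and takes the alternating sum back-to-front
-- with an explicit sign flag, reduced mod P each step (objective: alternative).

-- ===== PORT A =====
-- the three precomputation loops and C are the same code in Source A and Source B, so they are
-- shared helpers of both ports
def pvFact (n P : Int) : List Int :=
  (PySem.List.pyRange 1 (n + 1) 1).foldl
    (fun f i => f ++ [PySem.Int.mod (PySem.List.pyGetD f (-1) 0 * i) P]) [1]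

def pvInv (n P : Int) : List Int :=
  (PySem.List.pyRange 2 (n + 1) 1).foldl
    (fun v i => v ++ [P - PySem.Int.mod (PySem.Int.floordiv P i * PySem.List.pyGetD v (PySem.Int.mod P i) 0) P]) [0, 1]

def pvInvFact (n P : Int) : List Int :=
  let inv := pvInv n P
  (PySem.List.pyRange 1 (n + 1) 1).foldl
    (fun g i => g ++ [PySem.Int.mod (PySem.List.pyGetD g (-1) 0 * PySem.List.pyGetD inv i 0) P]) [1]

def pvC (fact inv_fact : List Int) (P a b : Int) : Int :=
  PySem.Int.mod (PySem.Int.mod (PySem.List.pyGetD fact a 0 * PySem.List.pyGetD inv_fact b 0) P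
    * PySem.List.pyGetD inv_fact (a - b) 0) P

def count_unrooted_labelled_trees (n : Int) (l : Int) (P : Int) : Int :=
  if n = 2 then (if l = 0 then 1 else 0) else
    let fact := pvFact n P
    let inv_fact := pvInvFact n P
    let k := n - l
    let ret := (PySem.List.pyRange 1 (k + 1) 1).foldl
      (fun r used =>
        let delta := PySem.Int.mod (pvC fact inv_fact P k used * PySem.Int.powMod used (n - 2).toNat P) P
        if PySem.Int.band used 1 = PySem.Int.band k 1 then r + delta else r - delta) 0
    PySem.Int.mod (PySem.Int.mod ret P * pvC fact inv_fact P n k) P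

-- ===== PORT B =====
-- termination fact for the sieve's while loop (cited by pvSieve's decreasing_by)
theorem pv_sq_le (p k : Int) (h : p * p ≤ k) : p ≤ k := by
  rcases (by omega : p ≤ 0 ∨ 1 ≤ p) with h0 | h0
  · have := mul_self_nonneg p; omega
  · have h2 : p ≤ p * p := le_mul_of_one_le_left (by omega) h0
    linarith

def pvSieveInner (k p : Int) (s : List Int) : List Int :=
  (PySem.List.pyRange (p * p) (k + 1) p).foldl
    (fun s m => if PySem.List.pyGetD s m 0 = m then PySem.List.pySetD s m p else s) s

def pvSieve (k : Int) (s : List Int) (p : Int) : List Int :=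
  if h : p * p ≤ k then
    pvSieve k (if PySem.List.pyGetD s p 0 = p then pvSieveInner k p s else s) (p + 1)
  else s
termination_by (k + 1 - p).toNat
decreasing_by have := pv_sq_le p k h; omega

def count_unrooted_labelled_trees_alt (n : Int) (l : Int) (P : Int) : Int :=
  if n = 2 then (if l = 0 then 1 else 0) else
    let fact := pvFact n P
    let inv_fact := pvInvFact n P
    let k := n - l
    let e := n - 2
    let spf := pvSieve k (PySem.List.pyRange 0 (k + 1) 1) 2
    let pw0 : List Int := List.replicate (k + 1).toNat 0
    let pw1 := if 1 ≤ k then PySem.List.pySetD pw0 1 (PySem.Int.mod 1 P) else pw0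
    let pw := (PySem.List.pyRange 2 (k + 1) 1).foldl
      (fun w u =>
        if PySem.List.pyGetD spf u 0 = u then
          PySem.List.pySetD w u (PySem.Int.powMod u e.toNat P)
        else
          PySem.List.pySetD w u (PySem.Int.mod
            (PySem.List.pyGetD w (PySem.List.pyGetD spf u 0) 0 *
             PySem.List.pyGetD w (PySem.Int.floordiv u (PySem.List.pyGetD spf u 0)) 0) P)) pw1
    let rs := (PySem.List.pyRange k 0 (-1)).foldl
      (fun (rs : Int × Int) u =>
        (PySem.Int.mod (rs.1 + rs.2 * PySem.Int.mod (pvC fact inv_fact P k u * PySem.List.pyGetD pw u 0) P) P, -rs.2))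
      ((0 : Int), (1 : Int))
    PySem.Int.mod (rs.1 * pvC fact inv_fact P n k) P

-- ===== PRECONDITION & SPEC =====
-- Pre_ is exactly the inputs on which A returns normally: everything else raises
-- (P = 0 with n ≠ 2, or an index outside the precomputed tables: l < 0 or l > n for
-- n ≥ 3, and the remaining degenerate shapes with n < 2).
def Pre_count_unrooted_labelled_trees (n : Int) (l : Int) (P : Int) : Prop :=
  n = 2 ∨ (P ≠ 0 ∧ ((3 ≤ n ∧ 0 ≤ l ∧ l ≤ n) ∨ (n = 1 ∧ 0 ≤ l ∧ l ≤ 1) ∨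
    (n = 0 ∧ l = 0) ∨ (n = -1 ∧ -1 ≤ l ∧ l ≤ 0)))
instance (n : Int) (l : Int) (P : Int) : Decidable (Pre_count_unrooted_labelled_trees n l P) := by
  unfold Pre_count_unrooted_labelled_trees; infer_instance

def pvWitness_count_unrooted_labelled_trees : Int × Int × Int := (5, 2, 7)

def Spec_count_unrooted_labelled_trees (n : Int) (l : Int) (P : Int) (out : Int) : Prop :=
  out = count_unrooted_labelled_trees_alt n l P
instance (n : Int) (l : Int) (P : Int) (out : Int) : Decidable (Spec_count_unrooted_labelled_trees n l P out) := by
  unfold Spec_count_unrooted_labelled_trees; infer_instance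

-- ===== CLAIM (what is proved, stated in full; the proofs are below) =====
def Claim_equal_count_unrooted_labelled_trees : Prop :=
  ∀ (n : Int) (l : Int) (P : Int), Dom_count_unrooted_labelled_trees n l P →
    Pre_count_unrooted_labelled_trees n l P →
    Spec_count_unrooted_labelled_trees n l P (count_unrooted_labelled_trees n l P)

-- ===== LEMMAS AND PROOFS =====

theorem pv_mod_congr {P : Int} (hP : P ≠ 0) {x y : Int} (h : P ∣ x - y) :
    PySem.Int.mod x P = PySem.Int.mod y P := by
  have hx := PySem.Int.floordiv_mul_add_mod x P
  have hy := PySem.Int.floordiv_mul_add_mod y P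
  obtain ⟨c, hc⟩ := h
  have hd : P ∣ (PySem.Int.mod x P - PySem.Int.mod y P) :=
    ⟨c - PySem.Int.floordiv x P + PySem.Int.floordiv y P, by linear_combination hc + hx - hy⟩
  rcases lt_trichotomy P 0 with h0 | h0 | h0
  · have b1 := PySem.Int.mod_neg_bounds x h0
    have b2 := PySem.Int.mod_neg_bounds y h0
    have : PySem.Int.mod x P - PySem.Int.mod y P = 0 :=
      Int.eq_zero_of_abs_lt_dvd (neg_dvd.mpr hd) (by rw [abs_lt]; omega)
    omega
  · exact absurd h0 hP
  · have b1 := PySem.Int.mod_nonneg x h0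
    have b2 := PySem.Int.mod_lt x h0
    have b3 := PySem.Int.mod_nonneg y h0
    have b4 := PySem.Int.mod_lt y h0
    have : PySem.Int.mod x P - PySem.Int.mod y P = 0 :=
      Int.eq_zero_of_abs_lt_dvd hd (by rw [abs_lt]; omega)
    omega

theorem pv_mod_mul_left {P : Int} (hP : P ≠ 0) (x y : Int) :
    PySem.Int.mod (PySem.Int.mod x P * y) P = PySem.Int.mod (x * y) P := by
  apply pv_mod_congr hP
  have hx := PySem.Int.floordiv_mul_add_mod x P
  exact ⟨-(PySem.Int.floordiv x P * y), by linear_combination y * hx⟩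

theorem pv_mod_mul {P : Int} (hP : P ≠ 0) (x y : Int) :
    PySem.Int.mod (PySem.Int.mod x P * PySem.Int.mod y P) P = PySem.Int.mod (x * y) P := by
  rw [pv_mod_mul_left hP, mul_comm x (PySem.Int.mod y P), pv_mod_mul_left hP, mul_comm y x]

theorem pv_mod_add_left {P : Int} (hP : P ≠ 0) (x y : Int) :
    PySem.Int.mod (PySem.Int.mod x P + y) P = PySem.Int.mod (x + y) P := by
  apply pv_mod_congr hP
  have hx := PySem.Int.floordiv_mul_add_mod x P
  exact ⟨-(PySem.Int.floordiv x P), by linear_combination hx⟩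

theorem pv_getD_set_ne {α : Type} (l : List α) (i j : Nat) (v d : α) (h : i ≠ j) :
    (l.set i v).getD j d = l.getD j d := by
  simp [List.getD_eq_getElem?_getD, List.getElem?_set, h]

theorem pv_getD_set_self {α : Type} (l : List α) (i : Nat) (v d : α) (h : i < l.length) :
    (l.set i v).getD i d = v := by
  simp [List.getD_eq_getElem?_getD, h]

theorem pv_pyGetD_nonneg {α : Type} (xs : List α) (j : Int) (d : α) (h : 0 ≤ j) :
    PySem.List.pyGetD xs j d = xs.getD j.toNat d := by
  rw [show j = ((j.toNat : Nat) : Int) from by omega, PySem.List.pyGetD_natCast]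
  congr 1

-- the sieve invariant: every entry is its own index or a proper divisor ≥ 2 of it
def pvSpfOk (s : List Int) (L : Nat) : Prop :=
  s.length = L ∧ ∀ m : Nat, m < L →
    (s.getD m 0 = (m : Int) ∨ (2 ≤ s.getD m 0 ∧ s.getD m 0 < (m : Int) ∧ s.getD m 0 ∣ (m : Int)))

theorem pv_sieveInner_ok {k p : Int} {s : List Int} {L : Nat} (hp : 2 ≤ p)
    (h : pvSpfOk s L) : pvSpfOk (pvSieveInner k p s) L := by
  unfold pvSieveInner
  refine List.foldlRecOn (motive := fun t => pvSpfOk t L) _ _ h (fun s' hs' m hm => ?_)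
  rw [PySem.List.mem_pyRange_iff_of_pos (by omega)] at hm
  obtain ⟨hm1, hm2, hm3⟩ := hm
  have hdvd : p ∣ m := by
    have hmm : m = (m - p * p) + p * p := by ring
    rw [hmm]; exact dvd_add hm3 (Dvd.intro p rfl)
  have hppos : 0 ≤ m := by nlinarith
  have hlt : p < m := by nlinarith
  split
  · rw [PySem.List.pySetD_of_nonneg _ _ hppos]
    constructor
    · rw [List.length_set]; exact hs'.1
    · intro j hj
      by_cases hjm : j = m.toNat
      · subst hjm
        rw [pv_getD_set_self _ _ _ _ (by rw [hs'.1]; omega)]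
        right
        refine ⟨hp, by omega, ?_⟩
        have : ((m.toNat : Int)) = m := by omega
        rw [this]; exact hdvd
      · rw [pv_getD_set_ne _ _ _ _ _ (by omega)]
        exact hs'.2 j hj
  · exact hs'

theorem pv_sieve_ok {k : Int} {L : Nat} :
    ∀ (p : Int) (s : List Int), 2 ≤ p → pvSpfOk s L → pvSpfOk (pvSieve k s p) L := by
  intro p s
  induction s, p using pvSieve.induct k with
  | case1 s p hg ih =>
    intro hp h
    rw [pvSieve, dif_pos hg]
    apply ih (by omega)
    split
    · exact pv_sieveInner_ok hp h
    · exact h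
  | case2 s p hg =>
    intro hp h
    rw [pvSieve, dif_neg hg]
    exact h

theorem pv_spf_ok (k : Int) (hk : 0 ≤ k) :
    pvSpfOk (pvSieve k (PySem.List.pyRange 0 (k + 1) 1) 2) (k + 1).toNat := by
  apply pv_sieve_ok 2 _ (by omega)
  constructor
  · rw [PySem.List.length_pyRange_one]; omega
  · intro m hm
    left
    have hlen : m < (PySem.List.pyRange 0 (k + 1) 1).length := by
      rw [PySem.List.length_pyRange_one]; omega
    rw [List.getD_eq_getElem?_getD, List.getElem?_eq_getElem hlen,
      PySem.List.getElem_pyRange_one _ _ _ hlen]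
    simp

-- pw loop correctness: every filled slot holds mod (j ^ E) P
theorem pv_pw_loop {P : Int} (hP : P ≠ 0) {k : Int} {spf : List Int} (E : Nat)
    (hspf : pvSpfOk spf (k + 1).toNat) :
    ∀ (a : Int) (w : List Int), 2 ≤ a → w.length = (k + 1).toNat →
      (∀ j : Int, 1 ≤ j → j < a → PySem.List.pyGetD w j 0 = PySem.Int.mod (j ^ E) P) →
      (∀ j : Int, 1 ≤ j → j < k + 1 →
        PySem.List.pyGetD ((PySem.List.pyRange a (k + 1) 1).foldl
          (fun w u =>
            if PySem.List.pyGetD spf u 0 = u then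
              PySem.List.pySetD w u (PySem.Int.powMod u E P)
            else
              PySem.List.pySetD w u (PySem.Int.mod
                (PySem.List.pyGetD w (PySem.List.pyGetD spf u 0) 0 *
                 PySem.List.pyGetD w (PySem.Int.floordiv u (PySem.List.pyGetD spf u 0)) 0) P)) w) j 0
          = PySem.Int.mod (j ^ E) P) := by
  intro a
  induction hN : (k + 1 - a).toNat using Nat.strong_induction_on generalizing a with
  | _ N ih =>
    intro w ha hlen hpre j hj1 hj2
    by_cases hcut : k + 1 ≤ a
    · rw [PySem.List.pyRange_one_eq_nil hcut]
      exact hpre j hj1 (by omega)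
    · push_neg at hcut
      rw [PySem.List.pyRange_one_cons hcut, List.foldl_cons]
      refine ih ((k + 1 - (a + 1)).toNat) (by omega) (a + 1) rfl _ (by omega) ?_ ?_ j hj1 hj2
      · split <;> rw [PySem.List.length_pySetD] <;> exact hlen
      · intro j' hj'1 hj'2
        have ha0 : (0 : Int) ≤ a := by omega
        have haNat : a.toNat < w.length := by rw [hlen]; omega
        split
        · rename_i htest
          rw [PySem.List.pySetD_of_nonneg _ _ ha0, pv_pyGetD_nonneg _ _ _ (by omega)]
          by_cases hja : j' = a
          · subst hja
            rw [pv_getD_set_self _ _ _ _ haNat]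
            simp [PySem.Int.powMod]
          · rw [pv_getD_set_ne _ _ _ _ _ (by omega)]
            rw [← pv_pyGetD_nonneg _ _ _ (by omega)]
            exact hpre j' hj'1 (by omega)
        · rename_i htest
          rw [PySem.List.pySetD_of_nonneg _ _ ha0, pv_pyGetD_nonneg _ _ _ (by omega)]
          by_cases hja : j' = a
          · subst hja
            rw [pv_getD_set_self _ _ _ _ haNat]
            have hsa := hspf.2 j'.toNat (by omega)
            have hspfa : PySem.List.pyGetD spf j' 0 = spf.getD j'.toNat 0 :=
              pv_pyGetD_nonneg _ _ _ (by omega)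
            rw [hspfa] at htest ⊢
            rcases hsa with hsa | ⟨hd2, hdlt, hdvd⟩
            · exact absurd (by rw [hsa]; omega) htest
            · set d := spf.getD j'.toNat 0 with hd
              have hjnat : ((j'.toNat : Nat) : Int) = j' := by omega
              rw [hjnat] at hdlt hdvd
              obtain ⟨q, hq⟩ := hdvd
              have hq1 : 1 ≤ q := by nlinarith
              have hqlt : q < j' := by nlinarith
              have hfd : PySem.Int.floordiv j' d = q := by
                rw [PySem.Int.floordiv_eq_ediv_of_pos (by omega), hq,
                  Int.mul_ediv_cancel_left _ (by omega)]
              rw [hfd]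
              rw [hpre d (by omega) (by omega), hpre q (by omega) (by omega)]
              rw [pv_mod_mul hP, ← mul_pow, ← hq]
          · rw [pv_getD_set_ne _ _ _ _ _ (by omega)]
            rw [← pv_pyGetD_nonneg _ _ _ (by omega)]
            exact hpre j' hj'1 (by omega)

-- the alternating sum, defined top-down
def pvG (δ : Int → Int) : Nat → Int
  | 0 => 0
  | a + 1 => δ ((a : Int) + 1) - pvG δ a

theorem pv_bfold {P : Int} (hP : P ≠ 0) (δ : Int → Int) :
    ∀ (a : Nat), 1 ≤ a → ∀ (r s : Int),
      ((PySem.List.pyRange (a : Int) 0 (-1)).foldl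
        (fun rs u => (PySem.Int.mod (rs.1 + rs.2 * δ u) P, -rs.2)) (r, s)).1
        = PySem.Int.mod (r + s * pvG δ a) P := by
  intro a
  induction a with
  | zero => omega
  | succ a ih =>
    intro _ r s
    rw [PySem.List.pyRange_neg_one_cons (by push_cast; omega), List.foldl_cons]
    have hc : ((a + 1 : Nat) : Int) - 1 = (a : Nat) := by push_cast; omega
    rw [hc]
    rcases Nat.eq_zero_or_pos a with h0 | h0
    · subst h0
      rw [show ((0 : Nat) : Int) = 0 from rfl, PySem.List.pyRange_neg_one_eq_nil le_rfl,
        List.foldl_nil]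
      show PySem.Int.mod (r + s * δ _) P = _
      congr 1
      simp [pvG]
    · rw [ih h0, pv_mod_add_left hP]
      congr 1
      show r + s * δ _ + -s * pvG δ a = r + s * pvG δ (a + 1)
      rw [show pvG δ (a + 1) = δ ((a : Int) + 1) - pvG δ a from rfl]
      push_cast
      ring

theorem pv_asum (δ : Int → Int) (K : Nat) :
    ∀ (a : Nat), a ≤ K →
      ((PySem.List.pyRange 1 ((a : Int) + 1) 1).map
        (fun u => if PySem.Int.mod u 2 = PySem.Int.mod (K : Int) 2 then δ u else -δ u)).sum
        = (if (K - a) % 2 = 0 then pvG δ a else -pvG δ a) := by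
  intro a
  induction a with
  | zero =>
    intro _
    rw [show ((0 : Nat) : Int) + 1 = 1 from by norm_num, PySem.List.pyRange_one_eq_nil le_rfl]
    simp [pvG]
  | succ a ih =>
    intro haK
    have h1 : ((a + 1 : Nat) : Int) + 1 = ((a : Int) + 1) + 1 := by push_cast; ring
    rw [h1, PySem.List.pyRange_one_succ_right (by omega), List.map_append, List.sum_append,
      List.map_singleton, List.sum_singleton, ih (by omega)]
    have hm1 : PySem.Int.mod ((a : Int) + 1) 2 = ((a : Int) + 1) % 2 :=
      PySem.Int.mod_eq_emod_of_pos (by omega)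
    have hm2 : PySem.Int.mod ((K : Nat) : Int) 2 = ((K : Int)) % 2 :=
      PySem.Int.mod_eq_emod_of_pos (by omega)
    by_cases hpar : (K - (a + 1)) % 2 = 0
    · have hc : PySem.Int.mod ((a : Int) + 1) 2 = PySem.Int.mod ((K : Nat) : Int) 2 := by
        rw [hm1, hm2]; omega
      rw [if_pos hc, if_pos hpar, if_neg (by omega : ¬ (K - a) % 2 = 0),
        show pvG δ (a + 1) = δ ((a : Int) + 1) - pvG δ a from rfl]
      ring
    · have hc : ¬ PySem.Int.mod ((a : Int) + 1) 2 = PySem.Int.mod ((K : Nat) : Int) 2 := by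
        rw [hm1, hm2]; omega
      rw [if_neg hc, if_neg hpar, if_pos (by omega : (K - a) % 2 = 0),
        show pvG δ (a + 1) = δ ((a : Int) + 1) - pvG δ a from rfl]
      ring

-- ===== VERDICT (by name: the statement is the Claim_ definition above) =====
theorem count_unrooted_labelled_trees_spec : Claim_equal_count_unrooted_labelled_trees := by
  intro n l P hdom hpre
  unfold Spec_count_unrooted_labelled_trees
  by_cases hn2 : n = 2
  · simp [count_unrooted_labelled_trees, count_unrooted_labelled_trees_alt, hn2]
  · rcases hpre with h2 | ⟨hP, -⟩
    · exact absurd h2 hn2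
    simp only [count_unrooted_labelled_trees, count_unrooted_labelled_trees_alt, if_neg hn2]
    by_cases hk1 : 1 ≤ n - l
    case neg =>
      rw [PySem.List.pyRange_one_eq_nil (by omega : n - l + 1 ≤ 1),
        PySem.List.pyRange_neg_one_eq_nil (by omega : n - l ≤ 0), List.foldl_nil, List.foldl_nil]
      exact pv_mod_mul_left hP 0 _
    case pos =>
      have hk0 : (0 : Int) ≤ n - l := by omega
      set K := (n - l).toNat with hKdef
      have hKc : ((K : Nat) : Int) = n - l := by omega
      set spf := pvSieve (n - l) (PySem.List.pyRange 0 (n - l + 1)) 2 with hspfdef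
      have hspf : pvSpfOk spf ((n - l) + 1).toNat := pv_spf_ok (n - l) hk0
      rw [if_pos hk1]
      set pw1 := PySem.List.pySetD (List.replicate (n - l + 1).toNat 0) 1 (PySem.Int.mod 1 P) with hpw1def
      have hpw1len : pw1.length = ((n - l) + 1).toNat := by
        rw [hpw1def, PySem.List.length_pySetD, List.length_replicate]
      have hpw1base : ∀ j : Int, 1 ≤ j → j < 2 →
          PySem.List.pyGetD pw1 j 0 = PySem.Int.mod (j ^ (n - 2).toNat) P := by
        intro j hj1 hj2
        have hj : j = 1 := by omega
        subst hj
        rw [hpw1def, PySem.List.pySetD_of_nonneg _ _ (by omega),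
          pv_pyGetD_nonneg _ _ _ (by omega),
          pv_getD_set_self _ _ _ _ (by rw [List.length_replicate]; omega), one_pow]
      set pwT := List.foldl
        (fun w u =>
          if PySem.List.pyGetD spf u 0 = u then
            PySem.List.pySetD w u (PySem.Int.powMod u (n - 2).toNat P)
          else
            PySem.List.pySetD w u (PySem.Int.mod
              (PySem.List.pyGetD w (PySem.List.pyGetD spf u 0) 0 *
               PySem.List.pyGetD w (PySem.Int.floordiv u (PySem.List.pyGetD spf u 0)) 0) P))
        pw1 (PySem.List.pyRange 2 (n - l + 1) 1) with hpwdef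
      have hpw : ∀ j : Int, 1 ≤ j → j < (n - l) + 1 →
          PySem.List.pyGetD pwT j 0 = PySem.Int.mod (j ^ (n - 2).toNat) P := by
        intro j hj1 hj2
        rw [hpwdef]
        exact pv_pw_loop hP _ hspf 2 pw1 (by omega) hpw1len hpw1base j hj1 hj2
      have hBeq := PySem.List.foldl_congr_mem (PySem.List.pyRange (n - l) 0 (-1))
        (fun (rs : Int × Int) u =>
          (PySem.Int.mod (rs.1 + rs.2 * PySem.Int.mod (pvC (pvFact n P) (pvInvFact n P) P (n - l) u *
             PySem.List.pyGetD pwT u 0) P) P, -rs.2))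
        (fun (rs : Int × Int) u =>
          (PySem.Int.mod (rs.1 + rs.2 * PySem.Int.mod (pvC (pvFact n P) (pvInvFact n P) P (n - l) u *
             PySem.Int.powMod u (n - 2).toNat P) P) P, -rs.2))
        ((0 : Int), (1 : Int))
        (by
          intro acc u hu
          rw [PySem.List.mem_pyRange_neg_one] at hu
          simp only []
          rw [hpw u (by omega) (by omega)]
          rfl)
      rw [hBeq]
      have hb := pv_bfold hP
        (fun u => PySem.Int.mod (pvC (pvFact n P) (pvInvFact n P) P (n - l) u * PySem.Int.powMod u (n - 2).toNat P) P)
        K (by omega) 0 1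
      rw [hKc] at hb
      rw [hb]
      have hAeq := PySem.List.foldl_congr_mem (PySem.List.pyRange 1 (n - l + 1) 1)
        (fun (r : Int) used =>
          if PySem.Int.band used 1 = PySem.Int.band (n - l) 1 then
            r + PySem.Int.mod (pvC (pvFact n P) (pvInvFact n P) P (n - l) used * PySem.Int.powMod used (n - 2).toNat P) P
          else r - PySem.Int.mod (pvC (pvFact n P) (pvInvFact n P) P (n - l) used * PySem.Int.powMod used (n - 2).toNat P) P)
        (fun (r : Int) u =>
          r + (if PySem.Int.mod u 2 = PySem.Int.mod (n - l) 2 then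
            PySem.Int.mod (pvC (pvFact n P) (pvInvFact n P) P (n - l) u * PySem.Int.powMod u (n - 2).toNat P) P
          else -PySem.Int.mod (pvC (pvFact n P) (pvInvFact n P) P (n - l) u * PySem.Int.powMod u (n - 2).toNat P) P))
        0
        (by
          intro acc u hu
          simp only []
          rw [PySem.Int.band_one, PySem.Int.band_one]
          split_ifs <;> ring)
      rw [hAeq, PySem.List.foldl_add]
      have hsum := pv_asum
        (fun u => PySem.Int.mod (pvC (pvFact n P) (pvInvFact n P) P (n - l) u * PySem.Int.powMod u (n - 2).toNat P) P)
        K K le_rfl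
      rw [if_pos (by omega : (K - K) % 2 = 0)] at hsum
      rw [hKc] at hsum
      rw [hsum]
      simp only [zero_add, one_mul]
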